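-- pv_equiv track=rewrite | github.com/damiankiwi/kurs_python | 19/099.py | transform_string
-- ===== SOURCE A (Python) =====
-- def transform_string(input_str):
--     result_str = ''
--     space_count = 0
--
--     for char in input_str:
--         if char == ' ':
--             space_count += 1
--         else:
--             if space_count >= 3:
--                 result_str += '-'
--             elif space_count == 1 or space_count == 2:
--                 result_str += '_'
--             result_str += char
--             space_count = 0
--
--     if space_count >= 3:
--         result_str += '-'
--     elif space_count == 1 or space_count == 2:
--         result_str += '_'
--
--     return result_str
-- ===== SOURCE B (Python) =====
-- def transform_string(input_str):
--     parts = []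
--     i, n = 0, len(input_str)
--     while i < n:
--         j = i
--         while j < n and input_str[j] == input_str[i]:
--             j += 1
--         run = input_str[i:j]
--         if run[0] == ' ':
--             parts.append('-' if len(run) >= 3 else '_')
--         else:
--             parts.append(run)
--         i = j
--     return ''.join(parts)
-- ===== Notes on version B (the rewrite author's own statement) =====
-- stated objective: simpler
-- what changed: Replaces A's per-character state machine (pending space counter with an end-of-string flush) by a traversal of maximal runs of equal characters, mapping each space run directly to its '-'/'_' marker and copying other runs verbatim.
import Mathlib
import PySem

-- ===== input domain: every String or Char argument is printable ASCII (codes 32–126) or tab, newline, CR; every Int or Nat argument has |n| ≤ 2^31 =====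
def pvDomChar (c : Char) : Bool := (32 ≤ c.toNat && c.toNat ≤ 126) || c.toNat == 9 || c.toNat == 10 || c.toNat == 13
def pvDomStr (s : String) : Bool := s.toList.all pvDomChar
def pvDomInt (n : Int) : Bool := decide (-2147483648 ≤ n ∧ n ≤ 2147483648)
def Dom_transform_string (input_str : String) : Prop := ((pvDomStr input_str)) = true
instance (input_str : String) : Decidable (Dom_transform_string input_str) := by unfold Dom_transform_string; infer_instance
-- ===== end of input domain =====

-- B replaces A's per-character pending-space state machine (with its end-of-string flush)
-- by a traversal of maximal runs of equal characters (objective: simpler).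

-- ===== PORT A =====
-- marker appended by A's flush logic for a pending space count k (branches in A's order)
def pvMarkerA (k : Nat) : List Char :=
  if k ≥ 3 then ['-'] else if k = 1 ∨ k = 2 then ['_'] else []

-- one iteration of A's for-loop: state = (result_str as chars, space_count)
def pvStepA (st : List Char × Nat) (c : Char) : List Char × Nat :=
  if c = ' ' then (st.1, st.2 + 1)
  else (st.1 ++ pvMarkerA st.2 ++ [c], 0)

def transform_string (input_str : String) : String :=
  String.mk ((input_str.toList.foldl pvStepA ([], 0)).1
    ++ pvMarkerA (input_str.toList.foldl pvStepA ([], 0)).2)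

-- ===== PORT B =====
-- B's outer while-loop: split into maximal runs of equal characters (the inner scan
-- j += 1 while input_str[j] == input_str[i] is the takeWhile; advancing i is the dropWhile)
def pvRuns : List Char → List (List Char)
  | [] => []
  | c :: rest =>
      (c :: rest.takeWhile (· == c)) :: pvRuns (rest.dropWhile (· == c))
  termination_by l => l.length
  decreasing_by
    simp only [List.length_cons]
    exact Nat.lt_succ_of_le (List.length_dropWhile_le _ _)

def transform_string_alt (input_str : String) : String :=
  String.mk ((pvRuns input_str.toList).flatMap fun run =>
    if run.head? = some ' ' then (if run.length ≥ 3 then ['-'] else ['_']) else run)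

-- ===== PRECONDITION & SPEC =====
def Spec_transform_string (input_str : String) (out : String) : Prop := out = transform_string_alt input_str
instance (input_str : String) (out : String) : Decidable (Spec_transform_string input_str out) := by unfold Spec_transform_string; infer_instance

-- ===== CLAIM (what is proved, stated in full; the proofs are below) =====
def Claim_equal_transform_string : Prop := ∀ (input_str : String), Dom_transform_string input_str → Spec_transform_string input_str (transform_string input_str)

-- ===== LEMMAS AND PROOFS =====

-- recursive reformulation of A's loop + flush, with pending space count k
def pvA' : List Char → Nat → List Char
  | [], k => pvMarkerA k
  | c :: t, k => if c = ' ' then pvA' t (k + 1) else pvMarkerA k ++ c :: pvA' t 0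

theorem pvFoldl_eq_A' (l : List Char) : ∀ (acc : List Char) (k : Nat),
    (l.foldl pvStepA (acc, k)).1 ++ pvMarkerA (l.foldl pvStepA (acc, k)).2
      = acc ++ pvA' l k := by
  induction l with
  | nil => intro acc k; simp [pvA']
  | cons c t ih =>
    intro acc k
    by_cases h : c = ' ' <;>
      simp [pvStepA, pvA', h, ih, List.append_assoc]

theorem pvA'_spaces (rest : List Char) : ∀ (k : Nat),
    pvA' rest k = pvA' (rest.dropWhile (· == ' ')) (k + (rest.takeWhile (· == ' ')).length) := by
  induction rest with
  | nil => intro k; simp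
  | cons c t ih =>
    intro k
    by_cases h : c = ' '
    · simp [pvA', h, ih, Nat.add_comm, Nat.add_assoc]
    · simp [pvA', h]

theorem pvA'_nonspace_run (run : List Char) : ∀ (rest : List Char),
    (∀ x ∈ run, x ≠ ' ') → pvA' (run ++ rest) 0 = run ++ pvA' rest 0 := by
  induction run with
  | nil => intro rest _; rfl
  | cons c t ih =>
    intro rest h
    have hc : c ≠ ' ' := h c (by simp)
    simp [pvA', hc, pvMarkerA, ih rest (fun x hx => h x (by simp [hx]))]

-- splitting off the marker when the remainder starts with a non-space (or is empty)
theorem pvA'_marker_split (l : List Char) (k : Nat)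
    (h : ∀ c, l.head? = some c → c ≠ ' ') :
    pvA' l k = pvMarkerA k ++ pvA' l 0 := by
  cases l with
  | nil => simp [pvA', pvMarkerA]
  | cons c t =>
    have hc : c ≠ ' ' := h c rfl
    simp [pvA', hc, pvMarkerA]

theorem pvMarkerA_pos (k : Nat) (hk : 1 ≤ k) :
    pvMarkerA k = (if k ≥ 3 then ['-'] else ['_']) := by
  unfold pvMarkerA
  split_ifs <;> first | rfl | omega

theorem pvMain (l : List Char) :
    pvA' l 0 = (pvRuns l).flatMap fun run =>
      if run.head? = some ' ' then (if run.length ≥ 3 then ['-'] else ['_']) else run := by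
  induction hn : l.length using Nat.strong_induction_on generalizing l with
  | _ n ih =>
  cases l with
  | nil => simp [pvA', pvMarkerA, pvRuns]
  | cons c rest =>
    rw [pvRuns]
    by_cases h : c = ' '
    · subst h
      have h1 : pvA' (' ' :: rest) 0 = pvA' rest 1 := by simp [pvA']
      rw [h1, pvA'_spaces rest 1]
      have hd : ∀ x, (rest.dropWhile (· == ' ')).head? = some x → x ≠ ' ' := by
        intro x hx h'
        subst h'
        have := List.head?_dropWhile_not (p := (· == ' ')) (l := rest)
        rw [hx] at this
        simp at this
      rw [pvA'_marker_split _ _ hd,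
        pvMarkerA_pos _ (by omega),
        ih _ (by subst hn; simp [Nat.lt_succ_of_le (List.length_dropWhile_le _ _)]) _ rfl]
      simp [List.flatMap_cons, List.head?]
      split_ifs <;> first | rfl | omega
    · have hrun : ∀ x ∈ c :: rest.takeWhile (· == c), x ≠ ' ' := by
        intro x hx
        rcases List.mem_cons.mp hx with h1 | h1
        · simpa [h1] using h
        · have := List.mem_takeWhile_imp h1
          simp at this
          simpa [this] using h
      have hsplit : c :: rest = (c :: rest.takeWhile (· == c)) ++ rest.dropWhile (· == c) := by
        simp [List.takeWhile_append_dropWhile]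
      rw [hsplit, pvA'_nonspace_run _ _ hrun,
        ih _ (by subst hn; simp [Nat.lt_succ_of_le (List.length_dropWhile_le _ _)]) _ rfl]
      simp [List.flatMap_cons, List.head?, h]

-- ===== VERDICT (by name: the statement is the Claim_ definition above) =====
theorem transform_string_spec : Claim_equal_transform_string := by
  intro s _
  unfold Spec_transform_string transform_string transform_string_alt
  have := pvFoldl_eq_A' s.toList [] 0
  simp only [List.nil_append] at this
  rw [this, pvMain]
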